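-- pv_equiv track=rewrite | github.com/cmbenello/141-discussion-final | solutions/recursion_lists_sols.py | rl_48_can_reach_sum_by_signs
-- ===== SOURCE A (Python) =====
-- from typing import Any, List, Optional, Tuple
--
-- def rl_48_can_reach_sum_by_signs(xs: List[int], target: int) -> bool:
--     if not xs:
--         return target == 0
--     first = xs[0]
--     rest = xs[1:]
--     return rl_48_can_reach_sum_by_signs(rest, target - first) or rl_48_can_reach_sum_by_signs(
--         rest, target + first
--     )
-- ===== SOURCE B (Python) =====
-- def rl_48_can_reach_sum_by_signs(xs, target):
--     sums = {0}
--     for x in xs: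
--         sums = {s + x for s in sums} | {s - x for s in sums}
--     return target in sums
-- ===== Notes on version B (the rewrite author's own statement) =====
-- stated objective: alternative
-- what changed: Replaced the branching recursion over sign choices with an iterative DP that maintains the set of reachable partial sums, one pass per element.
import Mathlib
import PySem

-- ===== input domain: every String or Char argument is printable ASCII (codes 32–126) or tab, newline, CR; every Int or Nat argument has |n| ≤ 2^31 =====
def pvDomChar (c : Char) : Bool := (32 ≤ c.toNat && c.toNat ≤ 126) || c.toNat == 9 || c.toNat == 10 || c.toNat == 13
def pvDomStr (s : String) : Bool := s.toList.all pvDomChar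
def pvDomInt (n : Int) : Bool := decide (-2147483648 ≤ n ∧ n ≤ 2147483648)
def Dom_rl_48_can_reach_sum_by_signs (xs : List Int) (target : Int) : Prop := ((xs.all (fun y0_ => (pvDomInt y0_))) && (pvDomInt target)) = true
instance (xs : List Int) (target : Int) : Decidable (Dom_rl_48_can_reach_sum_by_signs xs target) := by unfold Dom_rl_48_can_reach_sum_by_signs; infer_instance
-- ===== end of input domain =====

-- B replaces A's sign-branching recursion by an iterative DP over the
-- set of reachable partial sums (objective: alternative algorithm).

-- ===== PORT A =====
def rl_48_can_reach_sum_by_signs (xs : List Int) (target : Int) : Bool :=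
  match xs with
  | [] => target == 0
  | first :: rest =>
      rl_48_can_reach_sum_by_signs rest (target - first) ||
      rl_48_can_reach_sum_by_signs rest (target + first)

-- ===== PORT B =====
-- one loop iteration: sums = {s + x for s in sums} | {s - x for s in sums}
def pvStep_rl48 (sums : PySem.Set Int) (x : Int) : PySem.Set Int :=
  PySem.Set.union (PySem.Set.ofList (sums.map (fun s => s + x))) (sums.map (fun s => s - x))

def rl_48_can_reach_sum_by_signs_alt (xs : List Int) (target : Int) : Bool :=
  PySem.Set.contains (xs.foldl pvStep_rl48 (PySem.Set.ofList [0])) target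

-- ===== PRECONDITION & SPEC =====
def Spec_rl_48_can_reach_sum_by_signs (xs : List Int) (target : Int) (out : Bool) : Prop := out = rl_48_can_reach_sum_by_signs_alt xs target
instance (xs : List Int) (target : Int) (out : Bool) : Decidable (Spec_rl_48_can_reach_sum_by_signs xs target out) := by unfold Spec_rl_48_can_reach_sum_by_signs; infer_instance

-- ===== CLAIM (what is proved, stated in full; the proofs are below) =====
def Claim_equal_rl_48_can_reach_sum_by_signs : Prop := ∀ (xs : List Int) (target : Int), Dom_rl_48_can_reach_sum_by_signs xs target → Spec_rl_48_can_reach_sum_by_signs xs target (rl_48_can_reach_sum_by_signs xs target)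

-- ===== LEMMAS AND PROOFS =====

-- membership in one DP step
lemma mem_pvStep_rl48 (S : PySem.Set Int) (x b : Int) :
    b ∈ pvStep_rl48 S x ↔ ∃ s ∈ S, b = s + x ∨ b = s - x := by
  simp only [pvStep_rl48, PySem.Set.mem_union, PySem.Set.mem_ofList, List.mem_map]
  constructor
  · rintro (⟨s, hs, rfl⟩ | ⟨s, hs, rfl⟩) <;> exact ⟨s, hs, by simp⟩
  · rintro ⟨s, hs, rfl | rfl⟩
    · exact Or.inl ⟨s, hs, rfl⟩
    · exact Or.inr ⟨s, hs, rfl⟩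

-- loop invariant: t is in the DP set iff some base b in S lets A succeed on t - b
lemma mem_foldl_pvStep_rl48 (xs : List Int) :
    ∀ (S : List Int) (t : Int),
      t ∈ xs.foldl pvStep_rl48 S ↔ ∃ b ∈ S, rl_48_can_reach_sum_by_signs xs (t - b) = true := by
  induction xs with
  | nil =>
      intro S t
      simp only [List.foldl_nil, rl_48_can_reach_sum_by_signs, beq_iff_eq]
      constructor
      · intro h; exact ⟨t, h, by omega⟩
      · rintro ⟨b, hb, h⟩; have ht : t = b := by omega
        rw [ht]; exact hb
  | cons x xs ih =>
      intro S t
      rw [List.foldl_cons, ih]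
      constructor
      · rintro ⟨b, hb, h⟩
        rcases (mem_pvStep_rl48 S x b).mp hb with ⟨s, hs, rfl | rfl⟩
        · refine ⟨s, hs, ?_⟩
          simp only [rl_48_can_reach_sum_by_signs, Bool.or_eq_true]
          exact Or.inl (by rw [show t - s - x = t - (s + x) by ring]; exact h)
        · refine ⟨s, hs, ?_⟩
          simp only [rl_48_can_reach_sum_by_signs, Bool.or_eq_true]
          exact Or.inr (by rw [show t - s + x = t - (s - x) by ring]; exact h)
      · rintro ⟨s, hs, h⟩
        simp only [rl_48_can_reach_sum_by_signs, Bool.or_eq_true] at h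
        rcases h with h | h
        · exact ⟨s + x, (mem_pvStep_rl48 S x _).mpr ⟨s, hs, Or.inl rfl⟩,
            by rw [show t - (s + x) = t - s - x by ring]; exact h⟩
        · exact ⟨s - x, (mem_pvStep_rl48 S x _).mpr ⟨s, hs, Or.inr rfl⟩,
            by rw [show t - (s - x) = t - s + x by ring]; exact h⟩

-- ===== VERDICT (by name: the statement is the Claim_ definition above) =====
theorem rl_48_can_reach_sum_by_signs_spec : Claim_equal_rl_48_can_reach_sum_by_signs := by
  intro xs target _
  unfold Spec_rl_48_can_reach_sum_by_signs rl_48_can_reach_sum_by_signs_alt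
  rw [Bool.eq_iff_iff, PySem.Set.contains_iff, mem_foldl_pvStep_rl48]
  constructor
  · intro h; exact ⟨0, by simp [PySem.Set.mem_ofList], by simpa using h⟩
  · rintro ⟨b, hb, h⟩
    simp only [PySem.Set.mem_ofList, List.mem_singleton] at hb
    subst hb; simpa using h
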